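-- pv_equiv track=rewrite | github.com/sebastiaan-daniels/Advent-of-code | Aoc 2021/5.2.py | find_connection
-- ===== SOURCE A (Python) =====
-- def find_connection(coord:tuple) -> list: #finds all the coordinates in a line ((x1,y1),(x2,y2))
--     #horizontal cases (y1 = y2)
--     if coord[0][1] == coord[1][1]:
--         step= 1
--         if coord[1][0] < coord [0][0]: step = -1
--         if step == 1:
--             new = [(_,coord[0][1]) for _ in range(coord[0][0],coord[1][0] + 1,step)]
--         else:
--             new = [(_,coord[0][1]) for _ in range(coord[0][0],coord[1][0] - 1,step)]
--         return new
--     #vertical cases (x1 = x2)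
--     if coord[0][0] == coord[1][0]:
--         step = 1
--         if coord[1][1] < coord [0][1]: step = -1
--         if step == 1:
--             new = [(coord[0][0],_) for _ in range(coord[0][1],coord[1][1] + 1,step)]
--         else:
--             new = [(coord[0][0],_) for _ in range(coord[0][1],coord[1][1] - 1,step)]
--         return new
-- ===== SOURCE B (Python) =====
-- def _span(lo, hi):
--     # divide-and-conquer: all integers from lo to hi inclusive, ascending
--     if lo == hi:
--         return [lo]
--     mid = (lo + hi) // 2
--     return _span(lo, mid) + _span(mid + 1, hi)
--
--
-- def find_connection(coord: tuple) -> list: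
--     (x1, y1), (x2, y2) = coord
--     if y1 == y2:
--         pts = [(v, y1) for v in _span(min(x1, x2), max(x1, x2))]
--     elif x1 == x2:
--         pts = [(x1, v) for v in _span(min(y1, y2), max(y1, y2))]
--     else:
--         return None  # diagonal: A falls through and returns None too
--     if (x2, y2) < (x1, y1):
--         pts.reverse()
--     return pts
-- ===== Notes on version B (the rewrite author's own statement) =====
-- stated objective: alternative
-- what changed: Replaces A's four directional range walks by a divide-and-conquer span builder: the inclusive segment is built by recursive midpoint splitting of the canonical min..max interval, mapped onto the fixed axis, then reversed in a second pass when the endpoints are given in descending order.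
import Mathlib
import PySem

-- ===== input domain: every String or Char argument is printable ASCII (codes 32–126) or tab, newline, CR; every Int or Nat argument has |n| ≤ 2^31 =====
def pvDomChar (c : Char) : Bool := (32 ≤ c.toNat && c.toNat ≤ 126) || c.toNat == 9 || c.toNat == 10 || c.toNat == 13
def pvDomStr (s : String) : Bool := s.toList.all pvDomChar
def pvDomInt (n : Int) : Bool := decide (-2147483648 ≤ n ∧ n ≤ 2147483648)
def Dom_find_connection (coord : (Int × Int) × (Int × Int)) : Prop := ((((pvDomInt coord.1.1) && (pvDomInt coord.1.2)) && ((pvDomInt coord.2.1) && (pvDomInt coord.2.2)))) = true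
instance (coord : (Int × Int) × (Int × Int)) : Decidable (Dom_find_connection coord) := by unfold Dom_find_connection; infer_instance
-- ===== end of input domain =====

-- B builds the canonical ascending min..max span by divide-and-conquer midpoint splitting, then reverses it when the endpoints are descending (objective: alternative).

-- ===== PORT A =====
def find_connection (coord : (Int × Int) × (Int × Int)) : Option (List (Int × Int)) :=
  if coord.1.2 = coord.2.2 then
    -- horizontal case
    let step : Int := if coord.2.1 < coord.1.1 then -1 else 1
    if step = 1 then
      some ((PySem.List.pyRange coord.1.1 (coord.2.1 + 1) 1).map (fun x => (x, coord.1.2)))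
    else
      some ((PySem.List.pyRange coord.1.1 (coord.2.1 - 1) (-1)).map (fun x => (x, coord.1.2)))
  else if coord.1.1 = coord.2.1 then
    -- vertical case
    let step : Int := if coord.2.2 < coord.1.2 then -1 else 1
    if step = 1 then
      some ((PySem.List.pyRange coord.1.2 (coord.2.2 + 1) 1).map (fun y => (coord.1.1, y)))
    else
      some ((PySem.List.pyRange coord.1.2 (coord.2.2 - 1) (-1)).map (fun y => (coord.1.1, y)))
  else
    none  -- Python falls through and returns None

-- ===== PORT B =====
-- _span from Source B; the 'hi ≤ lo → [lo]' guard only makes the recursion total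
-- (Source B never calls _span with lo > hi), it does not change the computed value.
def spanDC (lo hi : Int) : List Int :=
  if _h : hi ≤ lo then [lo]
  else
    let mid := PySem.Int.floordiv (lo + hi) 2
    spanDC lo mid ++ spanDC (mid + 1) hi
termination_by (hi - lo).toNat
decreasing_by
  · have hb := PySem.Int.floordiv_two_mid_bounds (lo := lo) (hi := hi) (by omega)
    have : 2 * PySem.Int.floordiv (lo + hi) 2 ≤ lo + hi ∧ lo + hi < 2 * (PySem.Int.floordiv (lo + hi) 2 + 1) := by
      constructor
      · have := (PySem.Int.le_floordiv_iff_mul_le (a := lo + hi) (b := 2)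
          (q := PySem.Int.floordiv (lo + hi) 2) (by omega)).mp le_rfl
        omega
      · have := (PySem.Int.floordiv_lt_iff_lt_mul (a := lo + hi) (b := 2)
          (q := PySem.Int.floordiv (lo + hi) 2 + 1) (by omega)).mp (by omega)
        omega
    omega
  · have hb := PySem.Int.floordiv_two_mid_bounds (lo := lo) (hi := hi) (by omega)
    omega

def find_connection_alt (coord : (Int × Int) × (Int × Int)) : Option (List (Int × Int)) :=
  let x1 := coord.1.1; let y1 := coord.1.2
  let x2 := coord.2.1; let y2 := coord.2.2
  let pts? : Option (List (Int × Int)) :=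
    if y1 = y2 then
      some ((spanDC (min x1 x2) (max x1 x2)).map (fun v => (v, y1)))
    else if x1 = x2 then
      some ((spanDC (min y1 y2) (max y1 y2)).map (fun v => (x1, v)))
    else none
  match pts? with
  | none => none
  | some pts =>
    -- Python tuple comparison (x2, y2) < (x1, y1), lexicographic
    if x2 < x1 ∨ (x2 = x1 ∧ y2 < y1) then some pts.reverse else some pts

-- ===== PRECONDITION & SPEC =====
def Spec_find_connection (coord : (Int × Int) × (Int × Int)) (out : Option (List (Int × Int))) : Prop := out = find_connection_alt coord
instance (coord : (Int × Int) × (Int × Int)) (out : Option (List (Int × Int))) : Decidable (Spec_find_connection coord out) := by unfold Spec_find_connection; infer_instance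

-- ===== CLAIM (what is proved, stated in full; the proofs are below) =====
def Claim_equal_find_connection : Prop := ∀ (coord : (Int × Int) × (Int × Int)), Dom_find_connection coord → Spec_find_connection coord (find_connection coord)

-- ===== LEMMAS AND PROOFS =====

-- the divide-and-conquer span equals the ascending inclusive range
theorem spanDC_eq_aux (n : ℕ) : ∀ lo hi : Int, lo ≤ hi → (hi - lo).toNat = n →
    spanDC lo hi = (List.range (hi - lo + 1).toNat).map (fun k : ℕ => lo + (k : Int)) := by
  induction n using Nat.strong_induction_on with
  | _ n ih =>
    intro lo hi hle hn
    rw [spanDC]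
    by_cases heq : hi ≤ lo
    · rw [dif_pos heq]
      have : (hi - lo + 1).toNat = 1 := by omega
      rw [this]
      simp
    · rw [dif_neg heq]
      have hlt : lo < hi := by omega
      have hb := PySem.Int.floordiv_two_mid_bounds (lo := lo) (hi := hi) hle
      show spanDC lo (PySem.Int.floordiv (lo + hi) 2) ++
           spanDC (PySem.Int.floordiv (lo + hi) 2 + 1) hi = _
      set mid := PySem.Int.floordiv (lo + hi) 2 with hmid
      have hmlt : mid < hi := by
        have := (PySem.Int.le_floordiv_iff_mul_le (a := lo + hi) (b := 2)
          (q := mid) (by omega)).mp le_rfl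
        omega
      rw [ih (mid - lo).toNat (by omega) lo mid (by omega) rfl,
          ih (hi - (mid + 1)).toNat (by omega) (mid + 1) hi (by omega) rfl]
      have hsum : (hi - lo + 1).toNat = (mid - lo + 1).toNat + (hi - (mid + 1) + 1).toNat := by
        omega
      rw [hsum, List.range_add, List.map_append, List.map_map]
      congr 1
      apply List.map_congr_left
      intro k hk
      simp only [List.mem_range] at hk
      simp only [Function.comp_apply]
      omega

theorem spanDC_eq (lo hi : Int) (h : lo ≤ hi) :
    spanDC lo hi = (List.range (hi - lo + 1).toNat).map (fun k : ℕ => lo + (k : Int)) :=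
  spanDC_eq_aux (hi - lo).toNat lo hi h rfl

-- reversing a map over range flips the index
theorem reverse_map_range {α : Type} (n : ℕ) (f : ℕ → α) :
    ((List.range n).map f).reverse = (List.range n).map (fun k => f (n - 1 - k)) := by
  apply List.ext_getElem
  · simp
  · intro k h1 h2
    simp only [List.length_map, List.length_range] at h1 h2
    rw [List.getElem_reverse]
    simp [List.getElem_map, List.getElem_range]

-- ===== VERDICT (by name: the statement is the Claim_ definition above) =====
theorem find_connection_spec : Claim_equal_find_connection := by
  intro ⟨⟨x1, y1⟩, ⟨x2, y2⟩⟩ _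
  unfold Spec_find_connection
  simp only [find_connection, find_connection_alt]
  by_cases hy : y1 = y2
  · subst hy
    by_cases hx : x2 < x1
    · -- horizontal, descending: B reverses the ascending span
      rw [if_pos rfl, if_pos hx, if_neg (show ¬((-1:Int) = 1) by decide), if_pos rfl]
      simp only [if_pos (Or.inl hx : x2 < x1 ∨ (x2 = x1 ∧ y1 < y1))]
      rw [min_eq_right (by omega : x2 ≤ x1), max_eq_left (by omega : x2 ≤ x1),
          spanDC_eq x2 x1 (by omega), PySem.List.pyRange_neg_one, List.map_map, List.map_map,
          reverse_map_range,
          show (x1 - (x2 - 1)).toNat = (x1 - x2 + 1).toNat from by omega]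
      congr 1
      apply List.map_congr_left
      intro k hk
      simp only [List.mem_range] at hk
      simp only [Function.comp_apply, Prod.mk.injEq]
      exact ⟨by omega, trivial⟩
    · -- horizontal, ascending (includes the single point)
      rw [if_pos rfl, if_neg hx, if_pos rfl, if_pos rfl]
      have hcond : ¬ (x2 < x1 ∨ (x2 = x1 ∧ y1 < y1)) := by omega
      simp only [if_neg hcond]
      rw [min_eq_left (by omega : x1 ≤ x2), max_eq_right (by omega : x1 ≤ x2),
          spanDC_eq x1 x2 (by omega), PySem.List.pyRange_one, List.map_map, List.map_map,
          show (x2 + 1 - x1).toNat = (x2 - x1 + 1).toNat from by omega]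
  · by_cases hxv : x1 = x2
    · subst hxv
      by_cases hyy : y2 < y1
      · -- vertical, descending
        rw [if_neg hy, if_pos rfl, if_pos hyy, if_neg (show ¬((-1:Int) = 1) by decide),
            if_neg hy, if_pos rfl]
        simp only [lt_self_iff_false, true_and, false_or, if_pos hyy]
        rw [min_eq_right (by omega : y2 ≤ y1), max_eq_left (by omega : y2 ≤ y1),
            spanDC_eq y2 y1 (by omega), PySem.List.pyRange_neg_one, List.map_map, List.map_map,
            reverse_map_range,
            show (y1 - (y2 - 1)).toNat = (y1 - y2 + 1).toNat from by omega]
        congr 1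
        apply List.map_congr_left
        intro k hk
        simp only [List.mem_range] at hk
        simp only [Function.comp_apply, Prod.mk.injEq]
        exact ⟨trivial, by omega⟩
      · -- vertical, ascending
        rw [if_neg hy, if_pos rfl, if_neg hyy, if_pos rfl, if_neg hy, if_pos rfl]
        simp only [lt_self_iff_false, true_and, false_or, if_neg hyy]
        rw [min_eq_left (by omega : y1 ≤ y2), max_eq_right (by omega : y1 ≤ y2),
            spanDC_eq y1 y2 (by omega), PySem.List.pyRange_one, List.map_map, List.map_map,
            show (y2 + 1 - y1).toNat = (y2 - y1 + 1).toNat from by omega]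
    · -- diagonal: both sides None
      rw [if_neg hy, if_neg hxv, if_neg hy, if_neg hxv]
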